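-- pv_equiv track=rewrite | github.com/ichbin54p/minecraftCPUlib | minecraftCPUlib.py | convert_4_bits
-- ===== SOURCE A (Python) =====
-- def invert(val: int, max_int: int):
--     return (max_int - val) - 1
--
-- def horiz_bin_to_dec(bv: list):
--     v = 0
--     for d in range(len(bv)):
--         if bv[d] == "1":
--             v += 1 << invert(d, len(bv))
--     return v
--
-- def convert_4_bits(bv: list, add: int = 0):
--     o = []
--     for i in range(len(bv[0])):
--         l = []
--         for j in range(4):
--             l.append(bv[j][i])
--         o.append((horiz_bin_to_dec(l)+add))
--     o2 = ""
--     for i in range(len(o)):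
--         o2 += f"{o[i]}"
--         if i < len(o)-1:
--             o2 += " "
--
--     return o2+"\n"
-- ===== SOURCE B (Python) =====
-- def convert_4_bits(bv: list, add: int = 0):
--     n = len(bv[0])
--     o = [add] * n
--     for j in range(4):
--         w = 1 << (3 - j)
--         o = [o[i] + w if bv[j][i] == "1" else o[i] for i in range(n)]
--     return " ".join(str(v) for v in o) + "\n"
-- ===== Notes on version B (the rewrite author's own statement) =====
-- stated objective: simpler
-- what changed: B drops A's per-column list building and the horiz_bin_to_dec helper: it seeds a value list with the offset and accumulates each row's power-of-two contribution row-by-row (row-major instead of column-major), and replaces A's manual separator loop by a single ' '.join.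
import Mathlib
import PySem

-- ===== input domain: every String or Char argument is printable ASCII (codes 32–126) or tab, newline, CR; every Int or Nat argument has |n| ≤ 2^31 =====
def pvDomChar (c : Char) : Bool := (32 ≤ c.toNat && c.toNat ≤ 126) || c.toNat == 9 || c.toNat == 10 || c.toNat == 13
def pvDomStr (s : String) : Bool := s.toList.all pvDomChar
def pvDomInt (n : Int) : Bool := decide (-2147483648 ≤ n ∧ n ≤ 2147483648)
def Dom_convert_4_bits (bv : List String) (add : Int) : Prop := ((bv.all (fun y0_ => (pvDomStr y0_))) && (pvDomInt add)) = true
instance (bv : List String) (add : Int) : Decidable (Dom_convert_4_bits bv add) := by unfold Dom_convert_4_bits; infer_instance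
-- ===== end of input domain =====

-- B replaces A's column-list building, helper call and manual separator loop by a row-major
-- accumulation into a value list plus a join — simpler, same asymptotic cost.

-- ===== PORT A =====
def pvInvert (val : Int) (max_int : Int) : Int := (max_int - val) - 1

-- l's elements are the one-character strings bv[j][i]; modelled as Char, "== \"1\"" becomes = '1'
-- (exact on one-character strings).  1 << k ported as 2 ^ k (shift count here is always ≥ 0).
def pvHorizBinToDec (bv : List Char) : Int :=
  (PySem.List.pyRange 0 (bv.length : Int) 1).foldl
    (fun v d =>
      if PySem.List.pyGetD bv d ' ' = '1' then v + 2 ^ (pvInvert d (bv.length : Int)).toNat else v)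
    0

def convert_4_bits (bv : List String) (add : Int) : String :=
  let o : List Int :=
    (PySem.List.pyRange 0 (PySem.Str.len (PySem.List.pyGetD bv 0 "")) 1).foldl
      (fun o i =>
        let l : List Char :=
          (PySem.List.pyRange 0 4 1).foldl
            (fun l j => l ++ [(PySem.Str.pyGet? (PySem.List.pyGetD bv j "") i).getD ' ']) []
        o ++ [pvHorizBinToDec l + add]) []
  let o2 : String :=
    (PySem.List.pyRange 0 (o.length : Int) 1).foldl
      (fun o2 i =>
        let o2 := o2 ++ PySem.Int.toStr (PySem.List.pyGetD o i 0)
        if i < (o.length : Int) - 1 then o2 ++ " " else o2) ""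
  o2 ++ "\n"

-- ===== PORT B =====
def convert_4_bits_alt (bv : List String) (add : Int) : String :=
  let n : Int := PySem.Str.len (PySem.List.pyGetD bv 0 "")
  let o : List Int := List.replicate n.toNat add          -- [add] * n
  let o : List Int :=
    (PySem.List.pyRange 0 4 1).foldl
      (fun o j =>
        let w : Int := 2 ^ (3 - j).toNat                  -- 1 << (3 - j)
        (PySem.List.pyRange 0 n 1).map
          (fun i =>
            if (PySem.Str.pyGet? (PySem.List.pyGetD bv j "") i).getD ' ' = '1'
            then PySem.List.pyGetD o i 0 + w else PySem.List.pyGetD o i 0)) o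
  PySem.Str.join " " (o.map PySem.Int.toStr) ++ "\n"

-- ===== PRECONDITION & SPEC =====
-- Pre_ = exactly where Python A returns: bv nonempty, and if its first row is nonempty then
-- there are at least 4 rows and each of the first 4 rows is at least as long as row 0
-- (otherwise A raises IndexError).
def Pre_convert_4_bits (bv : List String) (add : Int) : Prop :=
  bv ≠ [] ∧
    (PySem.Str.len (bv.headD "") = 0 ∨
      (4 ≤ bv.length ∧
        ∀ j ∈ List.range 4, PySem.Str.len (bv.headD "") ≤ PySem.Str.len (bv.getD j "")))
instance (bv : List String) (add : Int) : Decidable (Pre_convert_4_bits bv add) := by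
  unfold Pre_convert_4_bits; infer_instance

def pvWitness_convert_4_bits : List String × Int := (["1010", "0110", "0001", "1111"], 3)

def Spec_convert_4_bits (bv : List String) (add : Int) (out : String) : Prop := out = convert_4_bits_alt bv add
instance (bv : List String) (add : Int) (out : String) : Decidable (Spec_convert_4_bits bv add out) := by unfold Spec_convert_4_bits; infer_instance

-- ===== CLAIM (what is proved, stated in full; the proofs are below) =====
def Claim_equal_convert_4_bits : Prop := ∀ (bv : List String) (add : Int), Dom_convert_4_bits bv add → Pre_convert_4_bits bv add → Spec_convert_4_bits bv add (convert_4_bits bv add)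

-- ===== LEMMAS AND PROOFS =====

lemma pyRange04 : PySem.List.pyRange 0 4 1 = [0, 1, 2, 3] := by decide

lemma horiz4 (a b c d : Char) :
    pvHorizBinToDec [a, b, c, d] =
      (if a = '1' then 8 else 0) + (if b = '1' then 4 else 0) +
      (if c = '1' then 2 else 0) + (if d = '1' then 1 else 0) := by
  simp only [pvHorizBinToDec, List.length_cons, List.length_nil]
  rw [show ((0+1+1+1+1 : Nat) : Int) = (4:Int) from by norm_num, pyRange04]
  simp only [List.foldl_cons, List.foldl_nil]
  rw [show PySem.List.pyGetD [a,b,c,d] 0 ' ' = a from by simp [PySem.List.pyGetD_zero],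
      show PySem.List.pyGetD [a,b,c,d] 1 ' ' = b from by rw [PySem.List.pyGetD_ofNat' [a,b,c,d] 1 ' ']; rfl,
      show PySem.List.pyGetD [a,b,c,d] 2 ' ' = c from by rw [PySem.List.pyGetD_ofNat' [a,b,c,d] 2 ' ']; rfl,
      show PySem.List.pyGetD [a,b,c,d] 3 ' ' = d from by rw [PySem.List.pyGetD_ofNat' [a,b,c,d] 3 ' ']; rfl]
  norm_num [pvInvert]
  split_ifs <;> decide

-- collapse 'o' built as a map over range when read back through pyGetD inside a new map
lemma map_read_map (F : Int → Int → Int) (g : Int → Int) (n : Int) :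
    (PySem.List.pyRange 0 n 1).map
        (fun i => F i (PySem.List.pyGetD ((PySem.List.pyRange 0 n 1).map g) i 0)) =
      (PySem.List.pyRange 0 n 1).map (fun i => F i (g i)) := by
  apply List.map_congr_left
  intro i hi
  rw [PySem.List.mem_pyRange_one] at hi
  rw [PySem.List.pyGetD_map_pyRange_of_nonneg g n i 0 hi.1 hi.2]

lemma read_replicate (n i : Int) (add : Int) (h0 : 0 ≤ i) (h1 : i < n) :
    PySem.List.pyGetD (List.replicate n.toNat add) i 0 = add := by
  rw [PySem.List.pyGetD_eq_getElem (List.replicate n.toNat add) 0 h0 (by simp; omega)]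
  simp

-- Str.join " " lemmas lifted from the Chars level
lemma str_join_nil : PySem.Str.join " " ([] : List String) = "" := by decide
lemma str_join_singleton (x : String) : PySem.Str.join " " [x] = x := by
  apply String.toList_inj.mp
  simp [PySem.Str.toList_join, PySem.Chars.join_singleton]
lemma str_join_cons_cons (p q : String) (rest : List String) :
    PySem.Str.join " " (p :: q :: rest) = p ++ " " ++ PySem.Str.join " " (q :: rest) := by
  apply String.toList_inj.mp
  simp [PySem.Str.toList_join, PySem.Chars.join_cons_cons]

-- the unconditional separator fold equals "all elements followed by a space"
lemma foldl_sep (parts : List String) (acc x : String) :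
    parts.foldl (fun a p => a ++ p ++ " ") acc ++ x = acc ++ PySem.Str.join " " (parts ++ [x]) := by
  induction parts generalizing acc with
  | nil => simp [str_join_singleton]
  | cons p ps ih =>
      simp only [List.foldl_cons, List.cons_append]
      rw [ih]
      cases ps with
      | nil => simp [str_join_cons_cons, String.append_assoc]
      | cons q rest => simp [str_join_cons_cons, String.append_assoc]

-- A's separator loop equals a join
lemma seploop_eq_join (l : List Int) :
    (PySem.List.pyRange 0 (l.length : Int) 1).foldl
        (fun o2 i =>
          let o2 := o2 ++ PySem.Int.toStr (PySem.List.pyGetD l i 0)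
          if i < (l.length : Int) - 1 then o2 ++ " " else o2) "" =
      PySem.Str.join " " (l.map PySem.Int.toStr) := by
  induction l using List.reverseRecOn with
  | nil => simp [PySem.List.pyRange_one_eq_nil, str_join_nil]
  | append_singleton l x _ =>
      have hsplit : PySem.List.pyRange 0 ((l ++ [x]).length : Int) 1 =
          PySem.List.pyRange 0 (l.length : Int) 1 ++ [(l.length : Int)] := by
        have : ((l ++ [x]).length : Int) = (l.length : Int) + 1 := by simp
        rw [this, PySem.List.pyRange_one_succ_right (by positivity)]
      rw [hsplit, List.foldl_append]
      -- prefix: the condition is always true and reads stay inside l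
      have hpre : (PySem.List.pyRange 0 (l.length : Int) 1).foldl
          (fun o2 i =>
            let o2 := o2 ++ PySem.Int.toStr (PySem.List.pyGetD (l ++ [x]) i 0)
            if i < ((l ++ [x]).length : Int) - 1 then o2 ++ " " else o2) "" =
          (l.map PySem.Int.toStr).foldl (fun a p => a ++ p ++ " ") "" := by
        rw [PySem.List.foldl_congr_mem
            (g := fun o2 i => o2 ++ PySem.Int.toStr (PySem.List.pyGetD l i 0) ++ " ")]
        · rw [PySem.List.foldl_pyRange_zero_pyGetD' l 0
              (fun a v => a ++ PySem.Int.toStr v ++ " ") ""]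
          simp [List.foldl_map]
        · intro acc i hi
          rw [PySem.List.mem_pyRange_one] at hi
          have hcond : i < ((l ++ [x]).length : Int) - 1 := by
            simp only [List.length_append, List.length_cons, List.length_nil]
            push_cast
            omega
          simp only [hcond, if_pos]
          congr 2
          rw [PySem.List.pyGetD_eq_getElem (l ++ [x]) 0 hi.1 (by simp; omega),
              PySem.List.pyGetD_eq_getElem l 0 hi.1 hi.2]
          rw [List.getElem_append_left]
      rw [hpre]
      -- last element: the condition is false, and it reads x
      have hx : PySem.List.pyGetD (l ++ [x]) (l.length : Int) 0 = x := by
        rw [PySem.List.pyGetD_eq_getElem (l ++ [x]) 0 (by positivity) (by simp)]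
        simp
      have hcond : ¬ ((l.length : Int) < ((l ++ [x]).length : Int) - 1) := by
        simp only [List.length_append, List.length_cons, List.length_nil]
        push_cast
        omega
      simp only [List.foldl_cons, List.foldl_nil, hx, hcond, if_neg, not_false_iff]
      rw [foldl_sep]
      simp

-- closed form of B's row-major fold (ch j i abstracts the character bv[j][i])
lemma altlist (ch : Int → Int → Char) (n add : Int) :
    (PySem.List.pyRange 0 4 1).foldl
      (fun o j =>
        let w : Int := 2 ^ (3 - j).toNat
        (PySem.List.pyRange 0 n 1).map
          (fun i => if ch j i = '1' then PySem.List.pyGetD o i 0 + w else PySem.List.pyGetD o i 0))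
      (List.replicate n.toNat add) =
    (PySem.List.pyRange 0 n 1).map (fun i =>
      let v1 := if ch 0 i = '1' then add + 2 ^ ((3:Int) - 0).toNat else add
      let v2 := if ch 1 i = '1' then v1 + 2 ^ ((3:Int) - 1).toNat else v1
      let v3 := if ch 2 i = '1' then v2 + 2 ^ ((3:Int) - 2).toNat else v2
      if ch 3 i = '1' then v3 + 2 ^ ((3:Int) - 3).toNat else v3) := by
  rw [pyRange04]
  simp only [List.foldl_cons, List.foldl_nil]
  have h1 : List.map
      (fun i => if ch 0 i = '1'
        then PySem.List.pyGetD (List.replicate n.toNat add) i 0 + 2 ^ ((3:Int) - 0).toNat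
        else PySem.List.pyGetD (List.replicate n.toNat add) i 0) (PySem.List.pyRange 0 n 1) =
      List.map (fun i => if ch 0 i = '1' then add + 2 ^ ((3:Int) - 0).toNat else add)
        (PySem.List.pyRange 0 n 1) := by
    apply List.map_congr_left
    intro i hi
    rw [PySem.List.mem_pyRange_one] at hi
    rw [read_replicate n i add hi.1 hi.2]
  rw [h1]
  have h2 := map_read_map (fun i v => if ch 1 i = '1' then v + 2 ^ ((3:Int) - 1).toNat else v)
    (fun i => if ch 0 i = '1' then add + 2 ^ ((3:Int) - 0).toNat else add) n
  simp only [] at h2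
  rw [h2]
  have h3 := map_read_map (fun i v => if ch 2 i = '1' then v + 2 ^ ((3:Int) - 2).toNat else v)
    (fun i => if ch 1 i = '1'
      then (if ch 0 i = '1' then add + 2 ^ ((3:Int) - 0).toNat else add) + 2 ^ ((3:Int) - 1).toNat
      else (if ch 0 i = '1' then add + 2 ^ ((3:Int) - 0).toNat else add)) n
  simp only [] at h3
  rw [h3]
  have h4 := map_read_map (fun i v => if ch 3 i = '1' then v + 2 ^ ((3:Int) - 3).toNat else v)
    (fun i => if ch 2 i = '1'
      then (if ch 1 i = '1'
        then (if ch 0 i = '1' then add + 2 ^ ((3:Int) - 0).toNat else add) + 2 ^ ((3:Int) - 1).toNat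
        else (if ch 0 i = '1' then add + 2 ^ ((3:Int) - 0).toNat else add)) + 2 ^ ((3:Int) - 2).toNat
      else (if ch 1 i = '1'
        then (if ch 0 i = '1' then add + 2 ^ ((3:Int) - 0).toNat else add) + 2 ^ ((3:Int) - 1).toNat
        else (if ch 0 i = '1' then add + 2 ^ ((3:Int) - 0).toNat else add))) n
  simp only [] at h4
  rw [h4]

-- ===== VERDICT (by name: the statement is the Claim_ definition above) =====
set_option maxHeartbeats 1000000 in
theorem convert_4_bits_spec : Claim_equal_convert_4_bits := by
  intro bv add _ _
  unfold Spec_convert_4_bits convert_4_bits convert_4_bits_alt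
  simp only []
  rw [seploop_eq_join]
  refine congrArg (fun z => z ++ "\n") ?_
  refine congrArg (fun L => PySem.Str.join " " (List.map PySem.Int.toStr L)) ?_
  have h := altlist (fun j i => (PySem.Str.pyGet? (PySem.List.pyGetD bv j "") i).getD ' ')
    (PySem.Str.len (PySem.List.pyGetD bv 0 "")) add
  simp only [] at h
  rw [h]
  rw [PySem.List.foldl_append_singleton_eq_map]
  simp only [pyRange04, List.foldl_cons, List.foldl_nil, List.nil_append, List.cons_append]
  simp only [horiz4]
  apply List.map_congr_left
  intro i _
  simp only [show ((3:Int) - 0).toNat = 3 from rfl, show ((3:Int) - 1).toNat = 2 from rfl,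
    show ((3:Int) - 2).toNat = 1 from rfl, show ((3:Int) - 3).toNat = 0 from rfl]
  split_ifs <;> ring
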